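-- pv_equiv track=rewrite | github.com/JohnStokes228/minimum_prime_hit_set | shared_functions.py | remove_single_elements
-- ===== SOURCE A (Python) =====
-- import itertools
-- import collections
--
-- def remove_single_elements(remaining):
--     """Remove elements that appear only once in the solution, if they appear in a decomposition containing at least one
--     other element that appears more than once.
--
--     Parameters
--     ---------
--     remaining : list
--         List of lists of prime numbers.
--
--     Returns
--     -------
--     list
--         List of lists of remaining prime factor decompositions, with single elements removed from each sublist.
--     """
--     element_list = list(itertools.chain.from_iterable(remaining))
--     counts = collections.Counter(element_list)
--
--     solo_elements = [key for key, value in counts.items()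
--                      if value == 1]
--
--     for decomposition in range(len(remaining)):
--         if (
--                 any(element in solo_elements for element in remaining[decomposition])
--                 and (not all(element in solo_elements for element in remaining[decomposition]))
--         ):
--             remaining[decomposition] = [i for i in remaining[decomposition]
--                                         if i not in solo_elements]
--
--     return remaining
-- ===== SOURCE B (Python) =====
-- def remove_single_elements(remaining):
--     """Sort the flattened list and detect multi-occurring primes by an
--     adjacent-duplicate scan (no Counter, no solo list); per sublist keep the
--     multi elements and decide replacement by a length comparison.
--     Mutates `remaining` in place like the original."""
--     flat = sorted(x for sub in remaining for x in sub)
--     multi = set()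
--     for a, b in zip(flat, flat[1:]):
--         if a == b:
--             multi.add(a)
--     for i, sub in enumerate(remaining):
--         kept = [x for x in sub if x in multi]
--         if kept and len(kept) < len(sub):
--             remaining[i] = kept
--     return remaining
-- ===== Notes on version B (the rewrite author's own statement) =====
-- stated objective: alternative
-- what changed: Replaces Counter-based solo detection with sort-plus-adjacent-duplicate scan that yields the complement set (multi-occurring elements), and replaces the three per-sublist any/all/filter scans over a solo list with one filter keeping multi elements plus a length comparison.
import Mathlib
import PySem

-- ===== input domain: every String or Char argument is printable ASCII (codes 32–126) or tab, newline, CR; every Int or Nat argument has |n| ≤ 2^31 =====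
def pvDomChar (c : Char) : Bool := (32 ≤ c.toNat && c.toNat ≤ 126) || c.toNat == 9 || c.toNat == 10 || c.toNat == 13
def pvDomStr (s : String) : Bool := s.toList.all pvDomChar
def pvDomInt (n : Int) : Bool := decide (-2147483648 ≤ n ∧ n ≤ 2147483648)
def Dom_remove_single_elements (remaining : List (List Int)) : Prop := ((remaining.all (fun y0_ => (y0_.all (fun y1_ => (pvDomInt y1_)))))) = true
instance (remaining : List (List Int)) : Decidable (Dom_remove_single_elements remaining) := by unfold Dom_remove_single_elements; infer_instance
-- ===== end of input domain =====

-- B replaces A's Counter + solo-list membership scans by sorting the flattened list,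
-- collecting multi-occurring elements from adjacent duplicates, and one filter plus a
-- length comparison per sublist; both mutate the argument in place in Python, the
-- equivalence proved is about the return value.

-- ===== PORT A =====
-- A's loop body: read remaining[d], and if it mixes solo and non-solo elements assign
-- the filtered list back to index d (the in-place update of the Python loop)
def rse_step (solo_elements : List Int) (rem : List (List Int)) (d : Int) : List (List Int) :=
  match PySem.List.pyGet? rem d with
  | none => rem
  | some s =>
    if (s.any (fun e => solo_elements.contains e))
        && !(s.all (fun e => solo_elements.contains e)) then
      PySem.List.pySetD rem d (s.filter (fun i => !solo_elements.contains i))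
    else rem

def remove_single_elements (remaining : List (List Int)) : List (List Int) :=
  let element_list : List Int := remaining.flatten
  let counts := PySem.Dict.counter element_list
  let solo_elements : List Int := (counts.items.filter (fun kv => kv.2 == (1 : Int))).map (·.1)
  (PySem.List.pyRange 0 remaining.length 1).foldl (rse_step solo_elements) remaining

-- ===== PORT B =====
-- B's second loop body: sub = p.2 (yielded by enumerate before any write to index p.1);
-- keep the multi elements, and assign back only when something was kept and something dropped
def rse_alt_step (multi : PySem.Set Int) (rem : List (List Int)) (p : Int × List Int) : List (List Int) :=
  let kept := p.2.filter (fun x => PySem.Set.contains multi x)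
  if !kept.isEmpty && decide (kept.length < p.2.length) then
    PySem.List.pySetD rem p.1 kept
  else rem

def remove_single_elements_alt (remaining : List (List Int)) : List (List Int) :=
  let flat : List Int := PySem.List.sorted remaining.flatten (fun x => x) false
  -- for a, b in zip(flat, flat[1:]): if a == b: multi.add(a)
  let multi : PySem.Set Int :=
    (flat.zip (PySem.List.slice flat (some 1) none)).foldl
      (fun s ab => if ab.1 == ab.2 then PySem.Set.add s ab.1 else s) PySem.Set.empty
  (PySem.List.enumerate remaining 0).foldl (rse_alt_step multi) remaining

-- ===== PRECONDITION & SPEC =====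
def Spec_remove_single_elements (remaining : List (List Int)) (out : List (List Int)) : Prop := out = remove_single_elements_alt remaining
instance (remaining : List (List Int)) (out : List (List Int)) : Decidable (Spec_remove_single_elements remaining out) := by unfold Spec_remove_single_elements; infer_instance

-- ===== CLAIM (what is proved, stated in full; the proofs are below) =====
def Claim_equal_remove_single_elements : Prop := ∀ (remaining : List (List Int)), Dom_remove_single_elements remaining → Spec_remove_single_elements remaining (remove_single_elements remaining)

-- ===== LEMMAS AND PROOFS =====

-- proof-side name for A's solo list (definitionally the inline code)
def soloOf (fl : List Int) : List Int :=
  ((PySem.Dict.counter fl).items.filter (fun kv => kv.2 == (1 : Int))).map (·.1)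

-- A's solo list holds exactly the elements occurring once
lemma mem_soloOf (fl : List Int) (x : Int) : x ∈ soloOf fl ↔ fl.count x = 1 := by
  unfold soloOf
  rw [PySem.Dict.items_counter, List.filter_map, List.map_map]
  simp only [List.mem_map, List.mem_filter, Function.comp, beq_iff_eq]
  constructor
  · rintro ⟨k, ⟨hk, hc⟩, rfl⟩
    exact_mod_cast hc
  · intro h1
    refine ⟨x, ⟨(PySem.Set.mem_ofList fl x).mpr (List.count_pos_iff.mp (by omega)),
      by exact_mod_cast h1⟩, rfl⟩

-- membership in the fold building the multi set
lemma mem_multi_fold (pairs : List (Int × Int)) (s0 : PySem.Set Int) (x : Int) :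
    x ∈ pairs.foldl (fun s ab => if ab.1 == ab.2 then PySem.Set.add s ab.1 else s) s0
      ↔ x ∈ s0 ∨ ∃ ab ∈ pairs, ab.1 = ab.2 ∧ ab.1 = x := by
  induction pairs generalizing s0 with
  | nil => simp
  | cons ab t ih =>
    simp only [List.foldl_cons, List.mem_cons]
    by_cases h : ab.1 = ab.2
    · rw [if_pos (by simpa using h), ih]
      simp only [PySem.Set.mem_add]
      constructor
      · rintro (⟨hx | hx⟩ | ⟨ab', h1, h2⟩)
        · exact Or.inl hx
        · exact Or.inr ⟨ab, Or.inl rfl, h, hx.symm⟩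
        · exact Or.inr ⟨ab', Or.inr h1, h2⟩
      · rintro (hx | ⟨ab', (rfl | h1), h2, h3⟩)
        · exact Or.inl (Or.inl hx)
        · exact Or.inl (Or.inr h3.symm)
        · exact Or.inr ⟨ab', h1, h2, h3⟩
    · rw [if_neg (by simpa using h), ih]
      constructor
      · rintro (hx | ⟨ab', h1, h2⟩)
        · exact Or.inl hx
        · exact Or.inr ⟨ab', Or.inr h1, h2⟩
      · rintro (hx | ⟨ab', (rfl | h1), h2, h3⟩)
        · exact Or.inl hx
        · exact absurd h2 h
        · exact Or.inr ⟨ab', h1, h2, h3⟩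

-- in a sorted list, a value has an equal adjacent pair iff it occurs at least twice
lemma adjacent_pair_iff_two_le_count (l : List Int) (hl : l.Pairwise (· ≤ ·)) (x : Int) :
    (∃ ab ∈ l.zip l.tail, ab.1 = ab.2 ∧ ab.1 = x) ↔ 2 ≤ l.count x := by
  induction l with
  | nil => simp
  | cons a t ih =>
    match t, hl with
    | [], _ =>
      simp only [List.tail_cons, List.zip_nil_right, List.not_mem_nil, false_and, exists_false,
        false_iff, not_le, List.count_cons, List.count_nil]
      split <;> omega
    | b :: t, hl =>
      rw [List.pairwise_cons] at hl
      obtain ⟨hab, hbt⟩ := hl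
      obtain ⟨hb, -⟩ := List.pairwise_cons.mp hbt
      have hzip : (a :: b :: t).zip (a :: b :: t).tail = (a, b) :: ((b :: t).zip t) := rfl
      rw [hzip]
      have ih' : (∃ ab ∈ (b :: t).zip t, ab.1 = ab.2 ∧ ab.1 = x) ↔ 2 ≤ (b :: t).count x := by
        have := ih hbt
        simpa using this
      have hcount : (a :: b :: t).count x = (b :: t).count x + (if a = x then 1 else 0) := by
        simp only [List.count_cons]
        split <;> split <;> simp_all
      constructor
      · rintro ⟨ab, hmem, heq, hx⟩
        rcases List.mem_cons.mp hmem with rfl | hmem'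
        · simp only at heq hx
          have hxb : x ∈ b :: t := by rw [← hx, heq]; exact List.mem_cons_self
          have h1 : 1 ≤ (b :: t).count x := List.count_pos_iff.mpr hxb
          rw [hcount, if_pos hx]
          omega
        · have h2 := ih'.mp ⟨ab, hmem', heq, hx⟩
          omega
      · intro h2
        by_cases hx : x = a
        · subst hx
          have hmem : x ∈ b :: t := by
            by_contra hmem
            have h0 : (b :: t).count x = 0 := List.count_eq_zero.mpr hmem
            rw [hcount, h0] at h2
            split at h2 <;> omega
          have hxb : x = b := by
            rcases List.mem_cons.mp hmem with h | hmem'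
            · exact h
            · have h1 : x ≤ b := hab b List.mem_cons_self
              have h2' : b ≤ x := hb x hmem'
              omega
          exact ⟨(x, b), List.mem_cons_self, by simp [hxb], rfl⟩
        · have h3 : 2 ≤ (b :: t).count x := by
            rw [hcount, if_neg (fun h => hx h.symm)] at h2; omega
          obtain ⟨ab, hmem', hp⟩ := ih'.mpr h3
          exact ⟨ab, List.mem_cons.mpr (Or.inr hmem'), hp⟩

-- B's index loop over enumerate writes each index at most once, from the sublist the
-- original enumerate yielded, so it is a map
def rse_alt_fun (multi : PySem.Set Int) (sub : List Int) : List Int :=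
  let kept := sub.filter (fun x => PySem.Set.contains multi x)
  if !kept.isEmpty && decide (kept.length < sub.length) then kept else sub

lemma foldl_enumerate_alt (multi : PySem.Set Int) :
    ∀ (tail pre : List (List Int)),
      (PySem.List.enumerate tail (pre.length : Int)).foldl (rse_alt_step multi) (pre ++ tail)
        = pre ++ tail.map (rse_alt_fun multi) := by
  intro tail
  induction tail with
  | nil => intro pre; simp [PySem.List.enumerate_nil]
  | cons t ts ih =>
    intro pre
    rw [PySem.List.enumerate_cons, List.foldl_cons]
    have hcast : (pre.length : Int) + 1 = (((pre ++ [rse_alt_fun multi t]).length : Nat) : Int) := by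
      simp
    have hstate : rse_alt_step multi (pre ++ t :: ts) ((pre.length : Nat), t)
        = (pre ++ [rse_alt_fun multi t]) ++ ts := by
      unfold rse_alt_step rse_alt_fun
      cases hc : (!(t.filter (fun x => PySem.Set.contains multi x)).isEmpty
          && decide ((t.filter (fun x => PySem.Set.contains multi x)).length < t.length)) with
      | true =>
        simp only [hc, if_true]
        rw [PySem.List.pySetD_natCast, List.set_append_right _ _ (le_refl _), Nat.sub_self]
        simp
      | false =>
        simp only [hc, Bool.false_eq_true, if_false]
        simp
    rw [hstate, hcast, ih (pre ++ [rse_alt_fun multi t])]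
    simp

-- A's index loop with in-place assignment is the same map (each index is read before
-- it is written, and earlier writes do not affect later reads)
lemma pyrange_set_map (solo : List Int) (xs : List (List Int)) :
    (PySem.List.pyRange 0 xs.length 1).foldl (rse_step solo) xs
    = xs.map (fun s =>
        if (s.any (fun e => solo.contains e)) && !(s.all (fun e => solo.contains e)) then
          s.filter (fun i => !solo.contains i)
        else s) := by
  set f : List Int → List Int := fun s =>
    if (s.any (fun e => solo.contains e)) && !(s.all (fun e => solo.contains e)) then
      s.filter (fun i => !solo.contains i)
    else s with hf
  suffices h2 : ∀ n : Nat, n ≤ xs.length →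
      (PySem.List.pyRange 0 (n : Int) 1).foldl (rse_step solo) xs
      = (xs.take n).map f ++ xs.drop n by
    have := h2 xs.length (le_refl _)
    simpa using this
  intro n hn
  induction n with
  | zero => simp [PySem.List.pyRange_one_eq_nil]
  | succ m ih =>
    have hm : m ≤ xs.length := Nat.le_of_succ_le hn
    have hmlt : m < xs.length := hn
    have hrange : PySem.List.pyRange 0 ((m + 1 : Nat) : Int) 1
        = PySem.List.pyRange 0 (m : Int) 1 ++ [(m : Int)] := by
      push_cast
      exact PySem.List.pyRange_one_succ_right (by positivity)
    rw [hrange, List.foldl_append, ih hm]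
    set rem := (xs.take m).map f ++ xs.drop m with hrem
    have hlen : rem.length = xs.length := by
      simp [hrem, Nat.min_eq_left hm]
      omega
    have hget : rem[m]? = some xs[m] := by
      rw [List.getElem?_append_right (by simp [Nat.min_eq_left hm])]
      simp [Nat.min_eq_left hm, List.getElem?_drop]
    have hgetpy : PySem.List.pyGet? rem ((m : Nat) : Int) = some xs[m] := by
      rw [PySem.List.pyGet?_natCast, hget]
    have hdrop : xs.drop m = xs[m] :: xs.drop (m + 1) :=
      List.drop_eq_getElem_cons hmlt
    have hsetlen : ((xs.take m).map f).length = m := by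
      simp [Nat.min_eq_left hm]
    have htake : List.map f (List.take (m+1) xs) = List.map f (List.take m xs) ++ [f xs[m]] := by
      rw [List.take_add_one, List.getElem?_eq_getElem hmlt]
      simp only [Option.toList_some, List.map_append, List.map_cons, List.map_nil]
    simp only [List.foldl_cons, List.foldl_nil, rse_step, hgetpy]
    by_cases hc : ((xs[m].any fun e => solo.contains e) && !xs[m].all fun e => solo.contains e) = true
    · rw [if_pos hc]
      rw [PySem.List.pySetD_natCast]
      have hset : ((xs.take m).map f ++ xs[m] :: xs.drop (m+1)).set m
              (xs[m].filter (fun i => !solo.contains i))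
            = (xs.take m).map f ++ (xs[m].filter (fun i => !solo.contains i)) :: xs.drop (m+1) := by
        rw [List.set_append_right _ _ (by omega), hsetlen, Nat.sub_self]
        rfl
      rw [hrem, hdrop, hset, htake]
      have : f xs[m] = xs[m].filter (fun i => !solo.contains i) := by rw [hf]; exact if_pos hc
      rw [this]
      simp
    · rw [if_neg hc]
      rw [hrem, htake, hdrop]
      have : f xs[m] = xs[m] := by rw [hf]; exact if_neg hc
      rw [this]
      simp

-- the per-sublist functions of A and B agree on sublists drawn from the flattened list
lemma per_sublist_eq (fl : List Int) (multi : PySem.Set Int)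
    (hmulti : ∀ x, PySem.Set.contains multi x = true ↔ 2 ≤ fl.count x)
    (s : List Int) (hs : ∀ x ∈ s, x ∈ fl) :
    (if (s.any (fun e => (soloOf fl).contains e)) && !(s.all (fun e => (soloOf fl).contains e)) then
        s.filter (fun i => !(soloOf fl).contains i)
      else s)
    = (let kept := s.filter (fun x => PySem.Set.contains multi x)
       if !kept.isEmpty && decide (kept.length < s.length) then kept else s) := by
  have hsolo : ∀ x, (soloOf fl).contains x = true ↔ fl.count x = 1 := by
    intro x; rw [List.contains_iff_mem, mem_soloOf]
  -- on elements of s, multi-membership is the negation of solo-membership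
  have hneg : ∀ x ∈ s, PySem.Set.contains multi x = !(soloOf fl).contains x := by
    intro x hx
    have hpos : 1 ≤ fl.count x := List.count_pos_iff.mpr (hs x hx)
    by_cases h1 : fl.count x = 1
    · rw [(hsolo x).mpr h1, Bool.not_true]
      cases hm : PySem.Set.contains multi x with
      | false => rfl
      | true => exact absurd ((hmulti x).mp hm) (by omega)
    · have h2 : 2 ≤ fl.count x := by omega
      rw [(hmulti x).mpr h2]
      cases hb : (soloOf fl).contains x with
      | false => rfl
      | true => exact absurd ((hsolo x).mp hb) h1
  have hkept : s.filter (fun x => PySem.Set.contains multi x)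
      = s.filter (fun i => !(soloOf fl).contains i) :=
    List.filter_congr hneg
  simp only [hkept]
  set kept := s.filter (fun i => !(soloOf fl).contains i) with hk
  have hany : (s.any (fun e => (soloOf fl).contains e)) = decide (kept.length < s.length) := by
    rw [Bool.eq_iff_iff, List.any_eq_true, decide_eq_true_iff, hk]
    constructor
    · rintro ⟨e, he, hce⟩
      apply List.length_filter_lt_length_iff_exists.mpr
      exact ⟨e, he, by simpa using hce⟩
    · intro hlt
      obtain ⟨e, he, hne⟩ := List.length_filter_lt_length_iff_exists.mp hlt
      exact ⟨e, he, by simpa using hne⟩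
  have hall : (s.all (fun e => (soloOf fl).contains e)) = kept.isEmpty := by
    rw [Bool.eq_iff_iff]
    simp [hk, List.isEmpty_iff, List.filter_eq_nil_iff, List.all_eq_true]
  rw [hany]
  have : (!(s.all (fun e => (soloOf fl).contains e))) = !kept.isEmpty := by rw [hall]
  rw [this, Bool.and_comm]

-- ===== VERDICT (by name: the statement is the Claim_ definition above) =====
theorem remove_single_elements_spec : Claim_equal_remove_single_elements := by
  intro remaining _
  show remove_single_elements remaining = remove_single_elements_alt remaining
  set fl := remaining.flatten with hfl
  set flat := PySem.List.sorted fl (fun x => x) false with hflat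
  set multi : PySem.Set Int :=
    (flat.zip (PySem.List.slice flat (some 1) none)).foldl
      (fun s ab => if ab.1 == ab.2 then PySem.Set.add s ab.1 else s) PySem.Set.empty with hmul
  have hA : remove_single_elements remaining
      = remaining.map (fun s =>
          if (s.any (fun e => (soloOf fl).contains e))
              && !(s.all (fun e => (soloOf fl).contains e)) then
            s.filter (fun i => !(soloOf fl).contains i)
          else s) :=
    pyrange_set_map (soloOf fl) remaining
  have hB : remove_single_elements_alt remaining = remaining.map (rse_alt_fun multi) := by
    show (PySem.List.enumerate remaining 0).foldl (rse_alt_step multi) remaining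
        = remaining.map (rse_alt_fun multi)
    have h := foldl_enumerate_alt multi remaining []
    simp only [List.length_nil, Nat.cast_zero, List.nil_append] at h
    exact h
  have hperm : flat.Perm fl := PySem.List.sorted_perm fl (fun x => x) false
  have hpw : flat.Pairwise (· ≤ ·) := by
    have := PySem.List.sorted_pairwise fl (fun x => x)
    simpa [← hflat] using this
  have hmulti : ∀ x, PySem.Set.contains multi x = true ↔ 2 ≤ fl.count x := by
    intro x
    rw [PySem.Set.contains_eq_listContains, List.contains_iff_mem, hmul,
      PySem.List.slice_from_one, mem_multi_fold]
    rw [adjacent_pair_iff_two_le_count flat hpw x, hperm.count_eq]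
    simp [PySem.Set.empty]
  rw [hA, hB]
  apply List.map_congr_left
  intro s hs
  exact per_sublist_eq fl multi hmulti s (fun x hx => List.mem_flatten.mpr ⟨s, hs, hx⟩)
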